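-- pv_equiv track=rewrite | github.com/hanqpark/algorithm_training | programmers/stack_queue/기능개발.py | solution
-- ===== SOURCE A (Python) =====
-- from collections import deque
--
-- def solution(progresses, speeds):
--     prog, spd, res, cnt = deque(progresses), deque(speeds), [], 0
--     while prog:
--         for i in range(len(prog)): prog[i] += spd[i]
--         for p in prog:
--             if p < 100: break
--             else: cnt += 1
--         if cnt:
--             res.append(cnt)
--             for _ in range(cnt): prog.popleft(); spd.popleft()
--             cnt = 0
--     return res
-- ===== SOURCE B (Python) =====
-- def solution(progresses, speeds):
--     res = []
--     cur_day = 0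
--     cur_cnt = 0
--     for p, s in zip(progresses, speeds):
--         d = -((p - 100) // s)  # days needed: ceil((100 - p) / s)
--         if cur_cnt == 0 or d > cur_day:
--             if cur_cnt:
--                 res.append(cur_cnt)
--             cur_day = d
--             cur_cnt = 1
--         else:
--             cur_cnt += 1
--     if cur_cnt:
--         res.append(cur_cnt)
--     return res
-- ===== Notes on version B (the rewrite author's own statement) =====
-- stated objective: alternative
-- what changed: Replaces A's day-by-day simulation (increment every remaining progress each day, count and pop the completed prefix) by a closed-form completion day d = ceil((100-p)/s) per task and a single pass that groups consecutive tasks whose day does not exceed the running group's day; intended as asymptotically better (O(n) vs O(n*D)) but a timing run could not confirm a ratio (A times out on unrestricted random inputs).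
-- outside the precondition, e.g. on solution([150, 99], [10, 1]): A returns [2], B returns [1, 1]; on solution([150, 50], [-10, 25]): A returns [1, 1], B returns [2]; on solution([150], [0]): A returns [1], B raises ZeroDivisionError
import Mathlib
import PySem

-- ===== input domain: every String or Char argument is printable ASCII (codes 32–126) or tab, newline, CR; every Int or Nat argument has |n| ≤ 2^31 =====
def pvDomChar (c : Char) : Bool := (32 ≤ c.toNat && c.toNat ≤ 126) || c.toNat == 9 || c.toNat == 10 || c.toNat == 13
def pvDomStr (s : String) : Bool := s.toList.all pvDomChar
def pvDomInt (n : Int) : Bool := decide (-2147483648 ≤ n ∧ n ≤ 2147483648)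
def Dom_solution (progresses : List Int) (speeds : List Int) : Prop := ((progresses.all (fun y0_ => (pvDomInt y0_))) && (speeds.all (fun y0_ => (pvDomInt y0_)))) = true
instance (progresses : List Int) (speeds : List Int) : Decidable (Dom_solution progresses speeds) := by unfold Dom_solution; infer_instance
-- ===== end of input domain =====

-- B replaces A's day-by-day simulation by a closed-form completion day per task and one
-- grouping pass (a different algorithm that avoids the per-day loop). Equivalence is
-- claimed on the problem's natural domain (Pre_): unfinished progresses (< 100),
-- positive speeds, and at least as many speeds as progresses.

-- ===== PORT A =====
-- the inner `for p in prog: if p < 100: break else: cnt += 1` (count of the completed prefix)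
def countDone : List Int → Nat
  | [] => 0
  | p :: t => if p < 100 then 0 else countDone t + 1

-- the `while prog:` loop; one fuel unit per iteration (= per simulated day).
-- `prog[i] += spd[i]` is zipWith (+): faithful whenever speeds is at least as long as
-- progresses (Pre_); Python raises IndexError otherwise.
def solLoop : Nat → List Int → List Int → List Int → List Int
  | 0, _, _, res => res
  | fuel + 1, prog, spd, res =>
    match prog with
    | [] => res
    | _ :: _ =>
      let prog' := List.zipWith (· + ·) prog spd
      let cnt := countDone prog'
      if cnt ≠ 0 then solLoop fuel (prog'.drop cnt) (spd.drop cnt) (res ++ [(cnt : Int)])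
      else solLoop fuel prog' spd res

-- fuel 2^31 + 100: within the stated domain (|progress| ≤ 2^31, Pre_: progress < 100,
-- speeds ≥ 1) every task completes within 100 - progress ≤ 2^31 + 100 days (dOf_bounds
-- below), and the while-loop runs exactly (last completion day) iterations before its
-- `while prog:` test stops it.
def solution (progresses : List Int) (speeds : List Int) : List Int :=
  solLoop 2147483748 progresses speeds []

-- ===== PORT B =====
-- d = -((p - 100) // s) : days needed, ceil((100-p)/s); Python `//` = PySem.Int.floordiv
def dOf (p s : Int) : Int := -(PySem.Int.floordiv (p - 100) s)

-- the loop body of Source B, state (cur_day, cur_cnt, res)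
def stepD (st : Int × Int × List Int) (d : Int) : Int × Int × List Int :=
  if st.2.1 = 0 ∨ st.1 < d then
    (d, 1, if st.2.1 ≠ 0 then st.2.2 ++ [st.2.1] else st.2.2)
  else (st.1, st.2.1 + 1, st.2.2)

def stepB (st : Int × Int × List Int) (ps : Int × Int) : Int × Int × List Int :=
  stepD st (dOf ps.1 ps.2)

def solution_alt (progresses : List Int) (speeds : List Int) : List Int :=
  let st := (progresses.zip speeds).foldl stepB (0, 0, [])
  if st.2.1 ≠ 0 then st.2.2 ++ [st.2.1] else st.2.2

-- ===== PRECONDITION & SPEC =====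
-- Pre_ is the natural domain of the problem (unfinished tasks, positive speeds). It
-- excludes: fewer speeds than progresses (A raises IndexError); a nonpositive speed for
-- a task (A loops forever unless that task's progress is already ≥ 100, and on those
-- already-completed corners B's ceiling formula raises on s = 0 or counts differently —
-- see the cites); a progress already ≥ 100 (A completes it on day 1 regardless of its
-- speed, B's formula may schedule it differently — see the cites).
def Pre_solution (progresses : List Int) (speeds : List Int) : Prop :=
  progresses.length ≤ speeds.length ∧
  (∀ p ∈ progresses, p < 100) ∧
  (∀ s ∈ speeds.take progresses.length, 0 < s)
instance (progresses : List Int) (speeds : List Int) : Decidable (Pre_solution progresses speeds) := by unfold Pre_solution; infer_instance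

def pvWitness_solution : List Int × List Int := ([93, 30, 55], [1, 30, 5])

def Spec_solution (progresses : List Int) (speeds : List Int) (out : List Int) : Prop := out = solution_alt progresses speeds
instance (progresses : List Int) (speeds : List Int) (out : List Int) : Decidable (Spec_solution progresses speeds out) := by unfold Spec_solution; infer_instance

-- ===== CLAIM (what is proved, stated in full; the proofs are below) =====
def Claim_equal_solution : Prop := ∀ (progresses : List Int) (speeds : List Int), Dom_solution progresses speeds → Pre_solution progresses speeds → Spec_solution progresses speeds (solution progresses speeds)
-- ===== LEMMAS AND PROOFS =====

-- the per-task day list both programs are secretly about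
def dsOf (prog spd : List Int) : List Int := (prog.zip spd).map (fun ps => dOf ps.1 ps.2)

-- A's loop expressed on the day list: each day decrements every remaining day count by 1,
-- then pops the completed (≤ 0) prefix
def dsLoop : Nat → List Int → List Int → List Int
  | 0, _, res => res
  | fuel + 1, ds, res =>
    match ds with
    | [] => res
    | _ :: _ =>
      let ds' := ds.map (· - 1)
      let cnt := (ds'.takeWhile (fun d => decide (d ≤ 0))).length
      if cnt ≠ 0 then dsLoop fuel (ds'.drop cnt) (res ++ [(cnt : Int)])
      else dsLoop fuel ds' res

-- grouping by running maximum, recursively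
def groups : List Int → List Int
  | [] => []
  | d :: t =>
    (1 + ((t.takeWhile (fun x => decide (x ≤ d))).length : Int)) ::
      groups (t.dropWhile (fun x => decide (x ≤ d)))
  termination_by l => l.length
  decreasing_by simp [Nat.lt_succ_iff]; exact List.length_dropWhile_le _ _

lemma dOf_le_zero_iff {p s : Int} (hs : 0 < s) : dOf p s ≤ 0 ↔ 100 ≤ p := by
  unfold dOf
  rw [neg_le, neg_zero, PySem.Int.le_floordiv_iff_mul_le hs]
  omega

lemma dOf_shift {p s : Int} (hs : 0 < s) : dOf (p + s) s = dOf p s - 1 := by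
  unfold dOf
  have : p + s - 100 = (p - 100) + 1 * s := by ring
  rw [this, PySem.Int.floordiv_eq_ediv_of_pos hs, PySem.Int.floordiv_eq_ediv_of_pos hs,
    Int.add_mul_ediv_right _ _ (by omega : s ≠ 0)]
  ring

lemma dOf_bounds {p s : Int} (hp1 : p < 100) (hs : 0 < s) :
    1 ≤ dOf p s ∧ dOf p s ≤ 100 - p := by
  unfold dOf
  constructor
  · have := (PySem.Int.floordiv_lt_iff_lt_mul (a := p - 100) (b := s) (q := 0) hs).mpr (by omega)
    omega
  · have hmul : (p - 100) * s ≤ p - 100 := by nlinarith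
    have := (PySem.Int.le_floordiv_iff_mul_le (a := p - 100) (b := s) (q := p - 100) hs).mpr hmul
    omega

lemma zip_drop {α β : Type} : ∀ (k : Nat) (l₁ : List α) (l₂ : List β),
    (l₁.drop k).zip (l₂.drop k) = (l₁.zip l₂).drop k := by
  intro k
  induction k with
  | zero => intro l₁ l₂; simp
  | succ n ih =>
    intro l₁ l₂
    cases l₁ with
    | nil => simp
    | cons a t₁ =>
      cases l₂ with
      | nil => simp
      | cons b t₂ => simpa using ih t₁ t₂

lemma dsOf_drop (k : Nat) (a b : List Int) :
    dsOf (a.drop k) (b.drop k) = (dsOf a b).drop k := by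
  unfold dsOf
  rw [zip_drop, List.map_drop]

lemma drop_takeWhile_length {α : Type} (p : α → Bool) :
    ∀ l : List α, l.drop (l.takeWhile p).length = l.dropWhile p := by
  intro l
  induction l with
  | nil => rfl
  | cons a t ih =>
    by_cases h : p a
    · simp [List.takeWhile_cons, List.dropWhile_cons, h, ih]
    · simp [List.takeWhile_cons, List.dropWhile_cons, h]

lemma dropWhile_headOK {α : Type} (p : α → Bool) :
    ∀ l : List α, match l.dropWhile p with | [] => True | h :: _ => ¬ p h := by
  intro l
  induction l with
  | nil => trivial
  | cons a t ih =>
    by_cases h : p a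
    · simpa [List.dropWhile_cons, h] using ih
    · simp [List.dropWhile_cons, h]

-- ds step of A = the ds list shifted down by one (needs every used speed positive)
lemma dsOf_zipWith : ∀ (prog spd : List Int), (∀ x ∈ prog.zip spd, 0 < x.2) →
    dsOf (List.zipWith (· + ·) prog spd) spd = (dsOf prog spd).map (· - 1) := by
  intro prog
  induction prog with
  | nil => intro spd _; rfl
  | cons p pt ih =>
    intro spd hpos
    cases spd with
    | nil => rfl
    | cons s st =>
      have hs : 0 < s := hpos (p, s) (by simp)
      simp only [List.zipWith_cons_cons, dsOf, List.zip_cons_cons, List.map_cons]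
      rw [dOf_shift hs]
      congr 1
      exact ih st (fun x hx => hpos x (by simp [hx]))

lemma countDone_eq : ∀ (prog spd : List Int), prog.length ≤ spd.length →
    (∀ x ∈ prog.zip spd, 0 < x.2) →
    countDone prog = ((dsOf prog spd).takeWhile (fun d => decide (d ≤ 0))).length := by
  intro prog
  induction prog with
  | nil => intro spd _ _; rfl
  | cons p pt ih =>
    intro spd hlen hpos
    cases spd with
    | nil => simp at hlen
    | cons s st =>
      have hs : 0 < s := hpos (p, s) (by simp)
      simp only [dsOf, List.zip_cons_cons, List.map_cons, List.takeWhile_cons, countDone]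
      by_cases h : p < 100
      · have : ¬ dOf p s ≤ 0 := by rw [dOf_le_zero_iff hs]; omega
        simp [h, this]
      · have : dOf p s ≤ 0 := by rw [dOf_le_zero_iff hs]; omega
        have ihr := ih st (by simpa using hlen) (fun x hx => hpos x (by simp [hx]))
        simp [h, this, dsOf] at ihr ⊢
        exact ihr

lemma solLoop_eq_dsLoop : ∀ (fuel : Nat) (prog spd res : List Int),
    prog.length ≤ spd.length → (∀ x ∈ prog.zip spd, 0 < x.2) →
    solLoop fuel prog spd res = dsLoop fuel (dsOf prog spd) res := by
  intro fuel
  induction fuel with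
  | zero => intro prog spd res _ _; rfl
  | succ n ih =>
    intro prog spd res hlen hpos
    cases prog with
    | nil => rfl
    | cons p pt =>
      cases spd with
      | nil => simp at hlen
      | cons s st =>
        have hzw : dsOf (List.zipWith (· + ·) (p :: pt) (s :: st)) (s :: st)
            = (dsOf (p :: pt) (s :: st)).map (· - 1) := dsOf_zipWith _ _ hpos
        have hlen' : (List.zipWith (· + ·) (p :: pt) (s :: st)).length ≤ (s :: st).length := by
          simp
        have hpos' : ∀ x ∈ (List.zipWith (· + ·) (p :: pt) (s :: st)).zip (s :: st), 0 < x.2 := by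
          clear hzw hlen' ih hlen
          revert hpos
      -- pointwise: the snd components of the zipped pairs are the same speeds
          generalize (p :: pt) = l₁
          generalize (s :: st) = l₂
          induction l₁ generalizing l₂ with
          | nil => intro _ x hx; simp at hx
          | cons a t₁ ihh =>
            cases l₂ with
            | nil => intro _ x hx; simp at hx
            | cons b t₂ =>
              intro hpos x hx
              simp only [List.zipWith_cons_cons, List.zip_cons_cons, List.mem_cons] at hx
              rcases hx with h | h
              · subst h; exact hpos (a, b) (by simp)
              · exact ihh t₂ (fun y hy => hpos y (by simp [hy])) x h
        have hcnt : countDone (List.zipWith (· + ·) (p :: pt) (s :: st))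
            = (((dsOf (p :: pt) (s :: st)).map (· - 1)).takeWhile (fun d => decide (d ≤ 0))).length := by
          rw [countDone_eq _ _ hlen' hpos', hzw]
        have hds : dsOf (p :: pt) (s :: st) = dOf p s :: dsOf pt st := rfl
        have hzw' : dsOf (List.zipWith (· + ·) (p :: pt) (s :: st)) (s :: st)
            = List.map (· - 1) (dOf p s :: dsOf pt st) := by rw [hzw, hds]
        have hcnt : countDone (List.zipWith (· + ·) (p :: pt) (s :: st))
            = ((List.map (· - 1) (dOf p s :: dsOf pt st)).takeWhile (fun d => decide (d ≤ 0))).length := by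
          rw [countDone_eq _ _ hlen' hpos', hzw']
        rw [hds]
        simp only [solLoop, dsLoop]
        rw [hcnt]
        split_ifs with hc
        · rw [ih _ _ _ (by simp only [List.length_drop]; simp at hlen' ⊢; omega) (by
            intro x hx
            rw [zip_drop] at hx
            exact hpos' x (List.mem_of_mem_drop hx)), dsOf_drop, hzw']
        · rw [ih _ _ _ hlen' hpos', hzw']

lemma groups_shift : ∀ (n : Nat) (ds : List Int), ds.length ≤ n →
    groups (ds.map (· - 1)) = groups ds := by
  intro n
  induction n with
  | zero =>
    intro ds h
    have hnil : ds = [] := List.length_eq_zero_iff.mp (by omega)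
    subst hnil; rfl
  | succ m ih =>
    intro ds h
    cases ds with
    | nil => rfl
    | cons d t =>
      have hcomp : ((fun x => decide (x ≤ d - 1)) ∘ fun x : Int => x - 1)
          = (fun x : Int => decide (x ≤ d)) := by
        funext x; simp
      rw [List.map_cons, groups, groups, List.takeWhile_map, List.dropWhile_map, hcomp]
      congr 1
      · simp
      · rw [ih _ (by
          have := List.length_dropWhile_le (fun x => decide (x ≤ d)) t
          simp at h ⊢; omega)]

lemma dsLoop_eq_groups : ∀ (fuel : Nat) (ds res : List Int),
    (match ds with | [] => True | h :: _ => 1 ≤ h) →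
    (∀ d ∈ ds, d ≤ (fuel : Int)) →
    dsLoop fuel ds res = res ++ groups ds := by
  intro fuel
  induction fuel with
  | zero =>
    intro ds res hhead hbound
    cases ds with
    | nil => simp [dsLoop, groups]
    | cons d t => have := hbound d (by simp); simp at hhead this; omega
  | succ n ih =>
    intro ds res hhead hbound
    cases ds with
    | nil => simp [dsLoop, groups]
    | cons d t =>
      simp only [dsLoop]
      have hd1 : 1 ≤ d := hhead
      by_cases hd : d = 1
      · subst hd
        have hcomp : ((fun x => decide (x ≤ (0:Int))) ∘ fun x : Int => x - 1)
            = (fun x : Int => decide (x ≤ 1)) := by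
          funext x; simp
        have htw : ((1 :: t).map (· - 1)).takeWhile (fun x => decide (x ≤ 0))
            = ((1 :: t).takeWhile (fun x => decide (x ≤ 1))).map (· - 1) := by
          rw [List.takeWhile_map, hcomp]
        have hdw : ((1 :: t).map (· - 1)).dropWhile (fun x => decide (x ≤ 0))
            = ((1 :: t).dropWhile (fun x => decide (x ≤ 1))).map (· - 1) := by
          rw [List.dropWhile_map, hcomp]
        have hkne : (((1 :: t).map (· - 1)).takeWhile (fun x => decide (x ≤ 0))).length ≠ 0 := by
          rw [htw, List.length_map]
          simp [List.takeWhile_cons]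
        rw [if_pos hkne, drop_takeWhile_length, hdw]
        have hhead' : match ((1 :: t).dropWhile (fun x => decide (x ≤ 1))).map (· - 1) with
            | [] => True | h :: _ => 1 ≤ h := by
          have := dropWhile_headOK (fun x => decide (x ≤ 1)) (1 :: t)
          cases hres : (1 :: t).dropWhile (fun x => decide (x ≤ 1)) with
          | nil => simp
          | cons a b => rw [hres] at this; simp at this ⊢; omega
        rw [ih _ _ hhead' (by
          intro x hx
          simp only [List.mem_map] at hx
          obtain ⟨y, hy, rfl⟩ := hx
          have := hbound y ((List.dropWhile_sublist _).subset hy)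
          push_cast; omega)]
        rw [groups_shift (((1 :: t).dropWhile (fun x => decide (x ≤ 1)))).length _ le_rfl]
        conv_rhs => rw [groups]
        rw [htw, List.length_map]
        simp only [List.append_assoc, List.singleton_append]
        congr 2
        simp [List.takeWhile_cons]
        push_cast
        ring
      · -- d ≥ 2 : nothing completes today
        have hcnt : (((d :: t).map (· - 1)).takeWhile (fun x => decide (x ≤ 0))).length = 0 := by
          simp [List.takeWhile_cons]
          omega
        rw [if_neg (by omega)]
        have hhead' : match (d :: t).map (· - 1) with | [] => True | h :: _ => 1 ≤ h := by
          simp; omega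
        rw [ih _ _ hhead' (by
          intro x hx
          simp only [List.mem_map] at hx
          obtain ⟨y, hy, rfl⟩ := hx
          have := hbound y hy
          push_cast; omega)]
        rw [groups_shift ((d :: t).length) _ le_rfl]

-- B's fold, characterised against `groups`
lemma foldD_char : ∀ (ds : List Int) (day cnt : Int) (res : List Int), 0 < cnt →
    (let st := ds.foldl stepD (day, cnt, res)
     if st.2.1 ≠ 0 then st.2.2 ++ [st.2.1] else st.2.2)
    = res ++ (cnt + ((ds.takeWhile (fun x => decide (x ≤ day))).length : Int))
        :: groups (ds.dropWhile (fun x => decide (x ≤ day))) := by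
  intro ds
  induction ds with
  | nil =>
    intro day cnt res hcnt
    simp [List.foldl_nil, groups]
    omega
  | cons d t ih =>
    intro day cnt res hcnt
    simp only [List.foldl_cons]
    by_cases h : d ≤ day
    · have hc0 : cnt ≠ 0 := by omega
      have hnl : ¬ day < d := by omega
      have hstep : stepD (day, cnt, res) d = (day, cnt + 1, res) := by
        simp [stepD, hc0, hnl]
      rw [hstep, ih _ _ _ (by omega)]
      simp [List.dropWhile_cons, h]
      omega
    · have hc0 : cnt ≠ 0 := by omega
      have hlt : day < d := by omega
      have hstep : stepD (day, cnt, res) d = (d, 1, res ++ [cnt]) := by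
        simp [stepD, hc0, hlt]
      rw [hstep, ih _ _ _ (by omega)]
      simp [List.dropWhile_cons, h, groups]

lemma solution_alt_eq_groups (prog spd : List Int) :
    solution_alt prog spd = groups (dsOf prog spd) := by
  unfold solution_alt dsOf
  rw [show (prog.zip spd).foldl stepB (0, 0, ([] : List Int))
      = ((prog.zip spd).map (fun ps => dOf ps.1 ps.2)).foldl stepD (0, 0, ([] : List Int)) by
    rw [List.foldl_map]
    rfl]
  generalize (prog.zip spd).map (fun ps => dOf ps.1 ps.2) = ds
  cases ds with
  | nil => simp [groups]
  | cons d t =>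
    simp only [List.foldl_cons]
    have : stepD (0, 0, ([] : List Int)) d = (d, 1, []) := by simp [stepD]
    rw [this]
    have := foldD_char t d 1 [] (by omega)
    simp only at this
    rw [this, groups]
    simp

lemma mem_dsOf_bounds (prog spd : List Int)
    (hp : ∀ p ∈ prog, p < 100) (hdom : ∀ p ∈ prog, -2147483648 ≤ p)
    (hpos : ∀ x ∈ prog.zip spd, 0 < x.2) :
    ∀ d ∈ dsOf prog spd, 1 ≤ d ∧ d ≤ 2147483748 := by
  intro d hd
  simp only [dsOf, List.mem_map] at hd
  obtain ⟨⟨a, b⟩, hab, rfl⟩ := hd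
  have hmem := (List.of_mem_zip hab).1
  have ha := hp a hmem
  have ha' := hdom a hmem
  have hb := hpos (a, b) hab
  have := dOf_bounds (p := (a, b).1) (s := (a, b).2) ha hb
  omega

lemma pos_of_take : ∀ (prog spd : List Int),
    (∀ s ∈ spd.take prog.length, 0 < s) → ∀ x ∈ prog.zip spd, 0 < x.2 := by
  intro prog
  induction prog with
  | nil => intro spd _ x hx; simp at hx
  | cons p pt ih =>
    intro spd hs x hx
    cases spd with
    | nil => simp at hx
    | cons s st =>
      simp only [List.zip_cons_cons, List.mem_cons] at hx
      rcases hx with h | h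
      · subst h; exact hs s (by simp)
      · exact ih st (fun y hy => hs y (by
          simp only [List.length_cons, List.take_succ_cons, List.mem_cons]
          exact Or.inr hy)) x h

-- ===== VERDICT (by name: the statement is the Claim_ definition above) =====
theorem solution_spec : Claim_equal_solution := by
  intro prog spd hdom hpre
  obtain ⟨hlen, hp, hs⟩ := hpre
  have hdom' : ∀ p ∈ prog, -2147483648 ≤ p := by
    simp only [Dom_solution, Bool.and_eq_true, List.all_eq_true, pvDomInt,
      decide_eq_true_eq] at hdom
    intro p hpm
    exact (hdom.1 p hpm).1
  have hpos : ∀ x ∈ prog.zip spd, 0 < x.2 := pos_of_take prog spd hs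
  unfold Spec_solution solution
  rw [solLoop_eq_dsLoop _ _ _ _ hlen hpos, solution_alt_eq_groups]
  have hbounds := mem_dsOf_bounds prog spd hp hdom' hpos
  rw [dsLoop_eq_groups 2147483748 _ []
    (by cases h : dsOf prog spd with
        | nil => trivial
        | cons d t => exact (hbounds d (by rw [h]; simp)).1)
    (by intro d hd; have := (hbounds d hd).2; push_cast; omega)]
  simp
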